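-- pv_equiv track=rewrite | github.com/ElmouhiYassine/Adder | ternary-arithmetic/adders_arithmetic_approximation.py | magnitude_bounds
-- ===== SOURCE A (Python) =====
-- def magnitude_bounds(bits):
--     mn = 0
--     mx = 0
--     for i, t in enumerate(bits):
--         if t == 1:
--             mn += (1 << i)
--             mx += (1 << i)
--         elif t == 0:
--             mx += (1 << i)
--     return mn, mx
-- ===== SOURCE B (Python) =====
-- def magnitude_bounds(bits):
--     mn_s = "".join("1" if t == 1 else "0" for t in reversed(bits))
--     mx_s = "".join("1" if t in (0, 1) else "0" for t in reversed(bits))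
--     return int(mn_s or "0", 2), int(mx_s or "0", 2)
-- ===== Notes on version B (the rewrite author's own statement) =====
-- stated objective: idiomatic
-- what changed: B builds two most-significant-first binary digit strings (digit test t==1 for mn, t in {0,1} for mx) and converts each with int(s, 2), instead of A's index-enumerated loop accumulating 1<<i shifts.
import Mathlib
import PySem

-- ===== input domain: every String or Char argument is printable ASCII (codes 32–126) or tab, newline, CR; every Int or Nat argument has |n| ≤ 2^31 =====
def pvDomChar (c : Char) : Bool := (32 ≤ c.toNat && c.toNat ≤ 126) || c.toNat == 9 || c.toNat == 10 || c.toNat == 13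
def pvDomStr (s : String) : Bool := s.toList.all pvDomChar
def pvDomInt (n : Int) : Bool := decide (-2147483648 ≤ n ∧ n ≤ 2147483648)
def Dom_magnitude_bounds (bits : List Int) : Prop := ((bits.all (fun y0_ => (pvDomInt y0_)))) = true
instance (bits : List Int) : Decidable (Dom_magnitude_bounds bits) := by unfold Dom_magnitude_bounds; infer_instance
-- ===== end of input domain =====

-- ===== PORT A =====
-- A: loop with enumerate; state (i, mn, mx), adds 1 << i (= 2^i) per branch.
def magnitude_bounds (bits : List Int) : Int × Int :=
  let r := bits.foldl (fun (s : Nat × Int × Int) t =>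
    if t = 1 then (s.1 + 1, s.2.1 + 2 ^ s.1, s.2.2 + 2 ^ s.1)
    else if t = 0 then (s.1 + 1, s.2.1, s.2.2 + 2 ^ s.1)
    else (s.1 + 1, s.2.1, s.2.2)) (0, 0, 0)
  (r.2.1, r.2.2)

-- ===== PORT B =====
-- B: builds the MSB-first digit strings and converts with int(s, 2);
-- ported as the Horner (base-2) evaluation of those digits over bits.reverse,
-- which is exactly int(s, 2) on a string of '0'/'1' digits ('or "0"' = start 0).
def magnitude_bounds_alt (bits : List Int) : Int × Int :=
  (bits.reverse.foldl (fun a t => 2 * a + (if t = 1 then 1 else 0)) 0,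
   bits.reverse.foldl (fun a t => 2 * a + (if t = 0 ∨ t = 1 then 1 else 0)) 0)

-- ===== PRECONDITION & SPEC =====
def Spec_magnitude_bounds (bits : List Int) (out : Int × Int) : Prop := out = magnitude_bounds_alt bits
instance (bits : List Int) (out : Int × Int) : Decidable (Spec_magnitude_bounds bits out) := by unfold Spec_magnitude_bounds; infer_instance

-- ===== CLAIM (what is proved, stated in full; the proofs are below) =====
def Claim_equal_magnitude_bounds : Prop := ∀ (bits : List Int), Dom_magnitude_bounds bits → Spec_magnitude_bounds bits (magnitude_bounds bits)

-- ===== LEMMAS AND PROOFS =====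

-- ===== VERDICT (by name: the statement is the Claim_ definition above) =====
-- digit value per position
def dMn (t : Int) : Int := if t = 1 then 1 else 0
def dMx (t : Int) : Int := if t = 0 ∨ t = 1 then 1 else 0

-- little-endian spec value
def specV (d : Int → Int) : List Int → Int
  | [] => 0
  | b :: r => d b + 2 * specV d r

theorem foldA_eq (bits : List Int) : ∀ (i : Nat) (mn mx : Int),
    bits.foldl (fun (s : Nat × Int × Int) t =>
      if t = 1 then (s.1 + 1, s.2.1 + 2 ^ s.1, s.2.2 + 2 ^ s.1)
      else if t = 0 then (s.1 + 1, s.2.1, s.2.2 + 2 ^ s.1)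
      else (s.1 + 1, s.2.1, s.2.2)) (i, mn, mx)
    = (i + bits.length, mn + 2 ^ i * specV dMn bits, mx + 2 ^ i * specV dMx bits) := by
  induction bits with
  | nil => intro i mn mx; simp [specV]
  | cons b r ih =>
    intro i mn mx
    simp only [List.foldl_cons]
    split_ifs with h1 h0
    · have e1 : dMn b = 1 := by simp [dMn, h1]
      have e2 : dMx b = 1 := by simp [dMx, h1]
      rw [ih]
      refine Prod.ext (by simp; omega) (Prod.ext ?_ ?_) <;>
        simp [specV, e1, e2] <;> ring
    · have e1 : dMn b = 0 := by simp [dMn, h1]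
      have e2 : dMx b = 1 := by simp [dMx, h0]
      rw [ih]
      refine Prod.ext (by simp; omega) (Prod.ext ?_ ?_) <;>
        simp [specV, e1, e2] <;> ring
    · have e1 : dMn b = 0 := by simp [dMn, h1]
      have e2 : dMx b = 0 := by simp [dMx, h1, h0]
      rw [ih]
      refine Prod.ext (by simp; omega) (Prod.ext ?_ ?_) <;>
        simp [specV, e1, e2] <;> ring

theorem specV_foldr (d : Int → Int) (bits : List Int) :
    specV d bits = List.foldr (fun x y => 2 * y + d x) 0 bits := by
  induction bits <;> simp [specV, *] <;> ring

theorem magnitude_bounds_spec : Claim_equal_magnitude_bounds := by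
  intro bits _
  unfold Spec_magnitude_bounds magnitude_bounds magnitude_bounds_alt
  rw [foldA_eq]
  refine Prod.ext ?_ ?_ <;> simp <;> rw [specV_foldr] <;> simp [dMn, dMx]
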